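-- pv_equiv track=rewrite | github.com/Brunopezman/Algoritmos-y-Programacion-I | Ejercicios guia/6. Cadenas de caracteres/6.2_6.3.py | replace_x
-- ===== SOURCE A (Python) =====
-- def replace_x(cadena, caracter, cantidad_reemplazos):
--
--     nueva_cadena = ''
--     acumulado = 0
--
--     for digito in cadena:
--         acumulado +=1
--         if acumulado <= cantidad_reemplazos:
--             nueva_cadena += caracter
--         else:
--             nueva_cadena += digito
--
--     return nueva_cadena
-- ===== SOURCE B (Python) =====
-- def replace_x(cadena, caracter, cantidad_reemplazos):
--     k = min(max(cantidad_reemplazos, 0), len(cadena))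
--     return caracter * k + cadena[k:]
-- ===== Notes on version B (the rewrite author's own statement) =====
-- stated objective: simpler
-- what changed: Replaces A's per-character loop with running counter and incremental concatenation by a single clamped count k = min(max(n,0), len(cadena)) and two slice-level operations: caracter * k + cadena[k:].
import Mathlib
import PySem

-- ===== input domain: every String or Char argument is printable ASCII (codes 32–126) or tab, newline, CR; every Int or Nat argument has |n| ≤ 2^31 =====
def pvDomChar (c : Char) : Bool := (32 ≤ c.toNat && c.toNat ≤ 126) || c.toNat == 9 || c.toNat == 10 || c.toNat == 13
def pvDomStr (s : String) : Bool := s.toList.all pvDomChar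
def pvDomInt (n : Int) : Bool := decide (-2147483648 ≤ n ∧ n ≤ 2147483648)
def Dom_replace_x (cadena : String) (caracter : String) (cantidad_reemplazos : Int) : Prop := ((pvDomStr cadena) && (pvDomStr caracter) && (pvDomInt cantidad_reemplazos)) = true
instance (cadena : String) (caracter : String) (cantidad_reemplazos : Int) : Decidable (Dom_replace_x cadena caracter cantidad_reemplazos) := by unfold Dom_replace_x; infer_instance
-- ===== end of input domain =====

-- B replaces A's per-character loop with a clamped count k and two slice-level
-- operations (caracter * k + cadena[k:]); objective: simpler.

-- ===== PORT A =====
-- one loop iteration: acumulado += 1; append caracter or the current character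
def replace_x_step (c : List Char) (n : Int) (st : List Char × Int) (d : Char) : List Char × Int :=
  let ac := st.2 + 1
  if ac ≤ n then (st.1 ++ c, ac) else (st.1 ++ [d], ac)

def replace_x (cadena : String) (caracter : String) (cantidad_reemplazos : Int) : String :=
  String.mk ((cadena.toList.foldl (replace_x_step caracter.toList cantidad_reemplazos) ([], 0)).1)

-- ===== PORT B =====
def replace_x_alt (cadena : String) (caracter : String) (cantidad_reemplazos : Int) : String :=
  let k : Int := min (max cantidad_reemplazos 0) (cadena.toList.length : Int)
  String.mk (PySem.List.pyRepeat caracter.toList k ++ PySem.List.slice cadena.toList (some k) none)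

-- ===== PRECONDITION & SPEC =====
def Spec_replace_x (cadena : String) (caracter : String) (cantidad_reemplazos : Int) (out : String) : Prop := out = replace_x_alt cadena caracter cantidad_reemplazos
instance (cadena : String) (caracter : String) (cantidad_reemplazos : Int) (out : String) : Decidable (Spec_replace_x cadena caracter cantidad_reemplazos out) := by unfold Spec_replace_x; infer_instance

-- ===== CLAIM (what is proved, stated in full; the proofs are below) =====
def Claim_equal_replace_x : Prop := ∀ (cadena : String) (caracter : String) (cantidad_reemplazos : Int), Dom_replace_x cadena caracter cantidad_reemplazos → Spec_replace_x cadena caracter cantidad_reemplazos (replace_x cadena caracter cantidad_reemplazos)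

-- ===== LEMMAS AND PROOFS =====

-- A's loop with counter a produces clamp(n - a) copies of the fill string
-- followed by the untouched suffix.
theorem replace_x_loop (c : List Char) (n : Int) :
    ∀ (l : List Char) (acc : List Char) (a : Int),
      (l.foldl (replace_x_step c n) (acc, a)).1
        = acc ++ (List.replicate ((min (max (n - a) 0) (l.length : Int)).toNat) c).flatten
              ++ l.drop ((min (max (n - a) 0) (l.length : Int)).toNat) := by
  intro l
  induction l with
  | nil => intro acc a; simp
  | cons d t ih =>
    intro acc a
    simp only [List.foldl_cons, replace_x_step]
    by_cases h : a + 1 ≤ n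
    · rw [if_pos h, ih]
      have hk : (min (max (n - a) 0) ((d :: t).length : Int)).toNat
          = (min (max (n - (a + 1)) 0) ((t.length : Int))).toNat + 1 := by
        simp only [List.length_cons]; push_cast; omega
      rw [hk]
      simp [List.replicate_succ, List.append_assoc]
    · rw [if_neg h, ih]
      have hk : (min (max (n - a) 0) ((d :: t).length : Int)).toNat = 0 := by
        simp only [List.length_cons]; push_cast; omega
      have hk' : (min (max (n - (a + 1)) 0) ((t.length : Int))).toNat = 0 := by omega
      rw [hk, hk']
      simp

-- ===== VERDICT (by name: the statement is the Claim_ definition above) =====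
theorem replace_x_spec : Claim_equal_replace_x := by
  intro cadena caracter n _
  have hk : (0:Int) ≤ min (max n 0) (cadena.toList.length : Int) := by positivity
  unfold Spec_replace_x replace_x replace_x_alt
  simp only [replace_x_loop, PySem.List.slice_from cadena.toList hk, PySem.List.pyRepeat, List.nil_append,
    sub_zero]
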